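-- pv_equiv track=rewrite | github.com/dhamosankaran/botuxtestautomation | backend/intelligent_testing.py | _analyze_end_state
-- ===== SOURCE A (Python) =====
-- from typing import List, Dict, Optional, Set
--
-- def _analyze_end_state(response: str, menu_options: List[str]) -> str:
--     """Determine the end state of a conversation path."""
--     response_lower = response.lower()
--
--     if any(kw in response_lower for kw in ["balance", "available", "$"]):
--         return "Shows balance information"
--     elif any(kw in response_lower for kw in ["payment", "pay", "amount due"]):
--         return "Payment flow"
--     elif any(kw in response_lower for kw in ["transfer", "move money"]):
--         return "Transfer flow"
--     elif any(kw in response_lower for kw in ["card", "lock", "replace"]):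
--         return "Card management"
--     elif any(kw in response_lower for kw in ["transaction", "activity", "history"]):
--         return "Transaction history"
--     elif menu_options:
--         return f"Menu with {len(menu_options)} options"
--     else:
--         return "Information response"
-- ===== SOURCE B (Python) =====
-- # Flat (keyword, label) pairs, highest priority first.
-- _PAIRS = [
--     ("balance", "Shows balance information"),
--     ("available", "Shows balance information"),
--     ("$", "Shows balance information"),
--     ("payment", "Payment flow"),
--     ("pay", "Payment flow"),
--     ("amount due", "Payment flow"),
--     ("transfer", "Transfer flow"),
--     ("move money", "Transfer flow"),
--     ("card", "Card management"),
--     ("lock", "Card management"),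
--     ("replace", "Card management"),
--     ("transaction", "Transaction history"),
--     ("activity", "Transaction history"),
--     ("history", "Transaction history"),
-- ]
--
--
-- def _analyze_end_state(response, menu_options):
--     """Determine the end state: overwrite-fold over the pairs in reverse priority order.
--
--     Start from the fallback answer; scanning pairs from lowest to highest
--     priority, each matching keyword overwrites the accumulator, so the
--     highest-priority match is written last and wins.  No early return.
--     """
--     response_lower = response.lower()
--     result = f"Menu with {len(menu_options)} options" if menu_options else "Information response"
--     for keyword, label in reversed(_PAIRS):
--         if keyword in response_lower:
--             result = label
--     return result
-- ===== Notes on version B (the rewrite author's own statement) =====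
-- stated objective: alternative
-- what changed: Replaces the short-circuiting elif ladder over keyword groups with a flat (keyword,label) list folded in REVERSE priority order with an overwrite accumulator seeded with the fallback answer, so the highest-priority match is written last and wins; no early return and no per-group any().
import Mathlib
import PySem

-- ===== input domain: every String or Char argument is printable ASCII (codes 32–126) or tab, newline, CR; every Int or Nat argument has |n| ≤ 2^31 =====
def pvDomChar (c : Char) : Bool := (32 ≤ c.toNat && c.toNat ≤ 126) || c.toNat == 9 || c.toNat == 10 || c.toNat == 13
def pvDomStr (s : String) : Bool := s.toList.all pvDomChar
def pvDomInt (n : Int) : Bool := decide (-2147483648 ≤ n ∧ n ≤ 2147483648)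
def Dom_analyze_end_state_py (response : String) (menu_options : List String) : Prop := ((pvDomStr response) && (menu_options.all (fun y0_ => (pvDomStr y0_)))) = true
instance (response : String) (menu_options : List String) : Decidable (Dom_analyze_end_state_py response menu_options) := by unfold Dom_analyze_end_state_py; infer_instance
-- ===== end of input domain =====

-- B replaces the elif ladder with an overwrite-fold over flat (keyword,label) pairs in reverse priority order; same cost, different shape.


-- ===== PORT A =====
def analyze_end_state_py (response : String) (menu_options : List String) : String :=
  let response_lower := PySem.Str.lower response
  if ["balance", "available", "$"].any (fun kw => PySem.Str.isIn kw response_lower) then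
    "Shows balance information"
  else if ["payment", "pay", "amount due"].any (fun kw => PySem.Str.isIn kw response_lower) then
    "Payment flow"
  else if ["transfer", "move money"].any (fun kw => PySem.Str.isIn kw response_lower) then
    "Transfer flow"
  else if ["card", "lock", "replace"].any (fun kw => PySem.Str.isIn kw response_lower) then
    "Card management"
  else if ["transaction", "activity", "history"].any (fun kw => PySem.Str.isIn kw response_lower) then
    "Transaction history"
  else if !menu_options.isEmpty then
    PySem.Str.join "" ["Menu with ", PySem.Int.toStr (menu_options.length : Int), " options"]
  else
    "Information response"

-- ===== PORT B =====
-- flat (keyword, label) pairs, highest priority first (Source B's _PAIRS)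
def pvPairs : List (String × String) :=
  [ ("balance", "Shows balance information"),
    ("available", "Shows balance information"),
    ("$", "Shows balance information"),
    ("payment", "Payment flow"),
    ("pay", "Payment flow"),
    ("amount due", "Payment flow"),
    ("transfer", "Transfer flow"),
    ("move money", "Transfer flow"),
    ("card", "Card management"),
    ("lock", "Card management"),
    ("replace", "Card management"),
    ("transaction", "Transaction history"),
    ("activity", "Transaction history"),
    ("history", "Transaction history") ]

def analyze_end_state_py_alt (response : String) (menu_options : List String) : String :=
  let response_lower := PySem.Str.lower response
  let init := if !menu_options.isEmpty then
      PySem.Str.join "" ["Menu with ", PySem.Int.toStr (menu_options.length : Int), " options"]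
    else "Information response"
  pvPairs.reverse.foldl
    (fun result p => if PySem.Str.isIn p.1 response_lower then p.2 else result) init

-- ===== PRECONDITION & SPEC =====
def Spec_analyze_end_state_py (response : String) (menu_options : List String) (out : String) : Prop := out = analyze_end_state_py_alt response menu_options
instance (response : String) (menu_options : List String) (out : String) : Decidable (Spec_analyze_end_state_py response menu_options out) := by unfold Spec_analyze_end_state_py; infer_instance

-- ===== CLAIM (what is proved, stated in full; the proofs are below) =====
def Claim_equal_analyze_end_state_py : Prop := ∀ (response : String) (menu_options : List String), Dom_analyze_end_state_py response menu_options → Spec_analyze_end_state_py response menu_options (analyze_end_state_py response menu_options)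

-- ===== LEMMAS AND PROOFS =====
theorem pv_if_or {α : Type} (a b : Bool) (x y : α) :
    (if (a || b) then x else y) = if a then x else if b then x else y := by
  cases a <;> cases b <;> simp

-- ===== VERDICT (by name: the statement is the Claim_ definition above) =====
theorem analyze_end_state_py_spec : Claim_equal_analyze_end_state_py := by
  intro response menu_options _
  unfold Spec_analyze_end_state_py analyze_end_state_py analyze_end_state_py_alt pvPairs
  simp only [List.any_cons, List.any_nil, Bool.or_false, List.reverse_cons, List.reverse_nil,
    List.nil_append, List.cons_append, List.foldl_cons, List.foldl_nil, pv_if_or]
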